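-- pv_equiv track=rewrite | github.com/child-play-neurips/child-play | lcl.py | can_place_piece
-- ===== SOURCE A (Python) =====
-- def can_place_piece(x, y, existing_pieces):
--     # Check for horizontal overlap
--     for ex, ey, _ in existing_pieces:
--         if ey == y and not set(range(x, x + 4)).isdisjoint(set(range(ex, ex + 4))):
--             return False  # Overlap detected
--
--     # Check for support: each piece above the first layer must be supported by at least one piece directly below it
--     if y > 0:
--         supported = False
--         for ex, ey, _ in existing_pieces:
--             if ey == y - 1 and (ex <= x < ex + 4 or ex < x + 4 <= ex + 4):
--                 supported = True
--                 break
--         if not supported: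
--             return False  # No support found
--
--     # Check for connectivity: pieces must connect via overlapping pegs
--     connected = False
--     for ex, ey, _ in existing_pieces:
--         # Check for horizontal connectivity via overlapping pegs
--         if (ey == y and (ex + 2 == x or ex - 2 == x)) or \
--            (ey == y + 1 and (ex <= x + 3 and ex >= x - 3)) or \
--            (ey == y - 1 and (ex <= x + 3 and ex >= x - 3)):
--             connected = True
--             break
--
--     if not connected and y > 0:
--         return False  # Not properly connected
--
--     # Additional check for base layer: ensure no gaps in horizontal connection without vertical support
--     if y == 0:
--         left_neighbor = any(ex == x - 4 and ey == y for ex, ey, _ in existing_pieces)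
--         right_neighbor = any(ex == x + 4 and ey == y for ex, ey, _ in existing_pieces)
--         if left_neighbor or right_neighbor:
--             return False  # No connecting piece above to bridge the gap
--
--     return True
-- ===== SOURCE B (Python) =====
-- def can_place_piece(x, y, existing_pieces):
--     # One pass accumulating four flags; interval predicates reduced to |ex - x| arithmetic.
--     overlap = supported = connected = edge = False
--     for ex, ey, _ in existing_pieces:
--         d = ex - x
--         if ey == y:
--             if -4 < d < 4:
--                 overlap = True
--             if d == 2 or d == -2:
--                 connected = True
--             if d == 4 or d == -4:
--                 edge = True
--         elif ey == y - 1: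
--             if -4 < d < 4:
--                 supported = True
--                 connected = True
--         elif ey == y + 1:
--             if -4 < d < 4:
--                 connected = True
--     if overlap:
--         return False
--     if y > 0:
--         return supported and connected
--     if y == 0:
--         return not edge
--     return True
-- ===== Notes on version B (the rewrite author's own statement) =====
-- stated objective: simpler
-- what changed: Three sequential scans plus two any() passes with set-of-range disjointness tests are fused into one pass that accumulates four boolean flags, with every interval test reduced to arithmetic on ex - x.
import Mathlib
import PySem

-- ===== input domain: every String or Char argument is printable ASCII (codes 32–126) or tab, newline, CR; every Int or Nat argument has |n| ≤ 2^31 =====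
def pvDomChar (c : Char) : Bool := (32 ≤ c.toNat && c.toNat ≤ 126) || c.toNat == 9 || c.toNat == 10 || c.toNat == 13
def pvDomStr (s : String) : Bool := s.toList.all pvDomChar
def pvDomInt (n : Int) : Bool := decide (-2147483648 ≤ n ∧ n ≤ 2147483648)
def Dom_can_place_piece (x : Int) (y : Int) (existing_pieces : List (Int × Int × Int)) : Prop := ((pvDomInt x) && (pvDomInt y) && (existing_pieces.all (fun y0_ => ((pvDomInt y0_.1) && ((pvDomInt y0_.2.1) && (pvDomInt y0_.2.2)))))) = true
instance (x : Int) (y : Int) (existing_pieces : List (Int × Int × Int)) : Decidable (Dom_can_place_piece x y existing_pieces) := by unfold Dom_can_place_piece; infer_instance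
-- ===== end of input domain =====

-- B fuses A's three sequential scans (one using set-of-range disjointness) and two any() passes
-- into a single pass accumulating four flags, with all interval tests reduced to arithmetic on ex - x.

-- ===== PORT A =====
-- first loop: returns true iff some piece triggers the overlap early return
def aOverlap (x y : Int) : List (Int × Int × Int) → Bool
  | [] => false
  | (ex, ey, _) :: rest =>
      if ey == y && !(PySem.Set.isdisjoint (PySem.Set.ofList (PySem.List.pyRange x (x+4) 1))
                      (PySem.Set.ofList (PySem.List.pyRange ex (ex+4) 1)))
      then true else aOverlap x y rest

-- second loop: supported flag (break on first hit)
def aSupported (x y : Int) : List (Int × Int × Int) → Bool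
  | [] => false
  | (ex, ey, _) :: rest =>
      if ey == y - 1 && ((ex ≤ x && x < ex + 4) || (ex < x + 4 && x + 4 ≤ ex + 4))
      then true else aSupported x y rest

-- third loop: connected flag (break on first hit)
def aConnected (x y : Int) : List (Int × Int × Int) → Bool
  | [] => false
  | (ex, ey, _) :: rest =>
      if (ey == y && (ex + 2 == x || ex - 2 == x)) ||
         (ey == y + 1 && (ex ≤ x + 3 && x - 3 ≤ ex)) ||
         (ey == y - 1 && (ex ≤ x + 3 && x - 3 ≤ ex))
      then true else aConnected x y rest

def can_place_piece (x : Int) (y : Int) (existing_pieces : List (Int × Int × Int)) : Bool :=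
  if aOverlap x y existing_pieces then false
  else if y > 0 && !(aSupported x y existing_pieces) then false
  else if !(aConnected x y existing_pieces) && y > 0 then false
  else if y == 0 then
    let left_neighbor := existing_pieces.any (fun p => p.1 == x - 4 && p.2.1 == y)
    let right_neighbor := existing_pieces.any (fun p => p.1 == x + 4 && p.2.1 == y)
    if left_neighbor || right_neighbor then false else true
  else true

-- ===== PORT B =====
-- state = (overlap, supported, connected, edge)
def bStep (x y : Int) (st : Bool × Bool × Bool × Bool) (p : Int × Int × Int) :
    Bool × Bool × Bool × Bool :=
  let d := p.1 - x
  if p.2.1 == y then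
    (st.1 || (-4 < d && d < 4), st.2.1, st.2.2.1 || (d == 2 || d == -2),
     st.2.2.2 || (d == 4 || d == -4))
  else if p.2.1 == y - 1 then
    (st.1, st.2.1 || (-4 < d && d < 4), st.2.2.1 || (-4 < d && d < 4), st.2.2.2)
  else if p.2.1 == y + 1 then
    (st.1, st.2.1, st.2.2.1 || (-4 < d && d < 4), st.2.2.2)
  else st

def can_place_piece_alt (x : Int) (y : Int) (existing_pieces : List (Int × Int × Int)) : Bool :=
  let s := existing_pieces.foldl (bStep x y) (false, false, false, false)
  if s.1 then false
  else if y > 0 then s.2.1 && s.2.2.1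
  else if y == 0 then !s.2.2.2
  else true

-- ===== PRECONDITION & SPEC =====
def Spec_can_place_piece (x : Int) (y : Int) (existing_pieces : List (Int × Int × Int)) (out : Bool) : Prop := out = can_place_piece_alt x y existing_pieces
instance (x : Int) (y : Int) (existing_pieces : List (Int × Int × Int)) (out : Bool) : Decidable (Spec_can_place_piece x y existing_pieces out) := by unfold Spec_can_place_piece; infer_instance

-- ===== CLAIM (what is proved, stated in full; the proofs are below) =====
def Claim_equal_can_place_piece : Prop := ∀ (x : Int) (y : Int) (existing_pieces : List (Int × Int × Int)), Dom_can_place_piece x y existing_pieces → Spec_can_place_piece x y existing_pieces (can_place_piece x y existing_pieces)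

-- ===== LEMMAS AND PROOFS =====

-- element predicates of B's single pass
def pOv (x y : Int) (p : Int × Int × Int) : Bool := p.2.1 == y && (-4 < p.1 - x && p.1 - x < 4)
def pSu (x y : Int) (p : Int × Int × Int) : Bool := p.2.1 == y - 1 && (-4 < p.1 - x && p.1 - x < 4)
def pCo (x y : Int) (p : Int × Int × Int) : Bool :=
  (p.2.1 == y && (p.1 - x == 2 || p.1 - x == -2)) ||
  ((p.2.1 == y - 1 || p.2.1 == y + 1) && (-4 < p.1 - x && p.1 - x < 4))
def pEd (x y : Int) (p : Int × Int × Int) : Bool := p.2.1 == y && (p.1 - x == 4 || p.1 - x == -4)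

theorem bStep_eq (x y : Int) (st : Bool × Bool × Bool × Bool) (p : Int × Int × Int) :
    bStep x y st p =
      (st.1 || pOv x y p, st.2.1 || pSu x y p, st.2.2.1 || pCo x y p, st.2.2.2 || pEd x y p) := by
  obtain ⟨ex, ey, z⟩ := p
  obtain ⟨a, b, c, d⟩ := st
  simp only [bStep, pOv, pSu, pCo, pEd]
  have e1 : (y == y - 1) = false := by simp; omega
  have e2 : (y == y + 1) = false := by simp
  have e3 : (y - 1 == y) = false := by simp
  have e4 : (y + 1 == y) = false := by simp
  have e5 : (y + 1 == y - 1) = false := by simp; omega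
  have e6 : (y - 1 == y + 1) = false := by simp; omega
  by_cases h1 : ey = y <;> by_cases h2 : ey = y - 1 <;> by_cases h3 : ey = y + 1 <;>
    first
      | omega
      | simp [h1, h2, h3, e1, e2, e3, e4, e5, e6]

theorem bStep_foldl (x y : Int) (l : List (Int × Int × Int)) (a b c d : Bool) :
    l.foldl (bStep x y) (a, b, c, d) =
      (a || l.any (pOv x y), b || l.any (pSu x y), c || l.any (pCo x y), d || l.any (pEd x y)) := by
  induction l generalizing a b c d with
  | nil => simp
  | cons p rest ih =>
    rw [List.foldl_cons, bStep_eq, ih]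
    simp [Bool.or_assoc]

theorem disj_iff (x ex : Int) :
    (!(PySem.Set.isdisjoint (PySem.Set.ofList (PySem.List.pyRange x (x+4) 1))
        (PySem.Set.ofList (PySem.List.pyRange ex (ex+4) 1)))) =
      (-4 < ex - x && ex - x < 4) := by
  have key : PySem.Set.isdisjoint (PySem.Set.ofList (PySem.List.pyRange x (x+4) 1))
      (PySem.Set.ofList (PySem.List.pyRange ex (ex+4) 1)) = true ↔ (ex + 4 ≤ x ∨ x + 4 ≤ ex) := by
    rw [PySem.Set.isdisjoint_iff]
    constructor
    · intro hall
      by_contra hcon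
      push Not at hcon
      exact hall (max x ex)
        (by rw [PySem.Set.mem_ofList, PySem.List.mem_pyRange_one]; omega)
        (by rw [PySem.Set.mem_ofList, PySem.List.mem_pyRange_one]; omega)
    · intro hor v hvA hvB
      rw [PySem.Set.mem_ofList, PySem.List.mem_pyRange_one] at hvA hvB
      omega
  rw [Bool.eq_iff_iff]
  simp only [Bool.not_eq_true', ← Bool.not_eq_true, key]
  simp
  omega

theorem aOverlap_eq (x y : Int) (l : List (Int × Int × Int)) :
    aOverlap x y l = l.any (pOv x y) := by
  induction l with
  | nil => rfl
  | cons p rest ih =>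
    obtain ⟨ex, ey, z⟩ := p
    simp only [aOverlap, List.any_cons, ← ih, pOv, disj_iff]
    split <;> simp_all

theorem aSupported_eq (x y : Int) (l : List (Int × Int × Int)) :
    aSupported x y l = l.any (pSu x y) := by
  induction l with
  | nil => rfl
  | cons p rest ih =>
    obtain ⟨ex, ey, z⟩ := p
    simp only [aSupported, List.any_cons, ← ih, pSu]
    have heq : (ey == y - 1 && ((ex ≤ x && x < ex + 4) || (ex < x + 4 && x + 4 ≤ ex + 4)))
         = (ey == y - 1 && (-4 < ex - x && ex - x < 4)) := by
      rw [Bool.eq_iff_iff]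
      simp
      omega
    rw [heq]
    split <;> simp_all

theorem aConnected_eq (x y : Int) (l : List (Int × Int × Int)) :
    aConnected x y l = l.any (pCo x y) := by
  induction l with
  | nil => rfl
  | cons p rest ih =>
    obtain ⟨ex, ey, z⟩ := p
    simp only [aConnected, List.any_cons, ← ih, pCo]
    have heq : ((ey == y && (ex + 2 == x || ex - 2 == x)) ||
         (ey == y + 1 && (ex ≤ x + 3 && x - 3 ≤ ex)) ||
         (ey == y - 1 && (ex ≤ x + 3 && x - 3 ≤ ex)))
        = ((ey == y && (ex - x == 2 || ex - x == -2)) ||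
           ((ey == y - 1 || ey == y + 1) && (-4 < ex - x && ex - x < 4))) := by
      rw [Bool.eq_iff_iff]
      simp
      omega
    rw [heq]
    split <;> simp_all

theorem edge_eq (x y : Int) (l : List (Int × Int × Int)) :
    (l.any (fun p => p.1 == x - 4 && p.2.1 == y) || l.any (fun p => p.1 == x + 4 && p.2.1 == y))
      = l.any (pEd x y) := by
  rw [Bool.eq_iff_iff]
  simp only [Bool.or_eq_true, List.any_eq_true, pEd, Bool.and_eq_true, beq_iff_eq,
    Bool.or_eq_true]
  constructor
  · rintro (⟨p, hp, h⟩ | ⟨p, hp, h⟩) <;> exact ⟨p, hp, by omega⟩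
  · rintro ⟨p, hp, h1, (h2 | h2)⟩
    · exact Or.inr ⟨p, hp, by omega⟩
    · exact Or.inl ⟨p, hp, by omega⟩

-- ===== VERDICT (by name: the statement is the Claim_ definition above) =====
theorem can_place_piece_spec : Claim_equal_can_place_piece := by
  intro x y eps _
  unfold Spec_can_place_piece can_place_piece can_place_piece_alt
  rw [bStep_foldl, aOverlap_eq, aSupported_eq, aConnected_eq, ← edge_eq x y eps]
  simp only [Bool.false_or]
  generalize eps.any (pOv x y) = O
  generalize eps.any (pSu x y) = S
  generalize eps.any (pCo x y) = C
  generalize (eps.any fun p => p.1 == x - 4 && p.2.1 == y) = L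
  generalize (eps.any fun p => p.1 == x + 4 && p.2.1 == y) = R
  by_cases hy : y > 0 <;> by_cases hy0 : y = 0 <;>
    cases O <;> cases S <;> cases C <;> cases L <;> cases R <;>
      simp [hy, hy0]
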